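-- pv_equiv track=rewrite | github.com/Vusal-Layijov/daily_ds-a | python/test.py | getMinSum
-- ===== SOURCE A (Python) =====
-- def getMinSum(security_values, msg):
--     n = len(msg)
--     msg_values = [security_values[ord(ch) - ord('a')] for ch in msg]
--
--     # Sort the message values in ascending order
--     msg_values.sort()
--
--     # Initialize two pointers, one at the beginning and one at the end of the sorted values
--     left, right = 0, n - 1
--     min_sum = 0
--
--     while left < right:
--         # Calculate the absolute difference between adjacent characters
--         diff = msg_values[right] - msg_values[left]
--         min_sum += diff
--
--         # Move the pointers towards the center
--         left += 1
--         right -= 1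
--
--     return min_sum
-- ===== SOURCE B (Python) =====
-- def getMinSum(security_values, msg):
--     # Count how many times each distinct security value occurs (one pass),
--     # then sort only the distinct values and take each block's weighted
--     # contribution to "sum of upper half minus sum of lower half".
--     counts = {}
--     for ch in msg:
--         v = security_values[ord(ch) - ord('a')]
--         counts[v] = counts.get(v, 0) + 1
--     n = len(msg)
--     half = n // 2
--     pos = 0
--     total = 0
--     for v in sorted(counts):
--         c = counts[v]
--         low = max(0, min(c, half - pos))
--         high = max(0, min(c, pos + c - (n - half)))
--         total += v * (high - low)
--         pos += c
--     return total
-- ===== Notes on version B (the rewrite author's own statement) =====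
-- stated objective: alternative
-- what changed: Instead of sorting all n mapped values and pairing them with two pointers, B counts occurrences of each distinct security value in one dict pass, sorts only the distinct values (at most 95 under the ASCII domain, 26 for lowercase messages), and adds each value's weighted contribution to (sum of upper half - sum of lower half).
import Mathlib
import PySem

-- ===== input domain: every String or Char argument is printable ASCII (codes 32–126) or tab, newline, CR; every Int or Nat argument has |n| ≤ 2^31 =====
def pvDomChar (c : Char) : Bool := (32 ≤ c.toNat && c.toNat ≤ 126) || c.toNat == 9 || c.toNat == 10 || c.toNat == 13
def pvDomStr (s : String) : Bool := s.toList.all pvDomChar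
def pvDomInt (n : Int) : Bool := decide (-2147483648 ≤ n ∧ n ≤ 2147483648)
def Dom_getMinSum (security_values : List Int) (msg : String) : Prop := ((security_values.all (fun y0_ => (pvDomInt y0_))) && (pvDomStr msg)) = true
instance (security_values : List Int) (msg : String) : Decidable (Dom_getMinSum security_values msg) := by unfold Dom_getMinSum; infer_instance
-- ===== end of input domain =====

-- B replaces A's "sort all n mapped values, then a two-pointer pairing loop" by "count occurrences
-- of each distinct value once, sort only the distinct values, and add each value's weighted
-- contribution to (sum of upper half - sum of lower half)".

-- ===== PORT A =====
-- the while loop of A; fuel = n bounds the iterations (the loop runs exactly n/2 times)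
def pvAWhile (s : List Int) : Nat → Int → Int → Int → Int
  | 0, _, _, acc => acc
  | fuel+1, left, right, acc =>
    if left < right then
      pvAWhile s fuel (left+1) (right-1)
        (acc + (PySem.List.pyGetD s right 0 - PySem.List.pyGetD s left 0))
    else acc

-- 'security_values[ord(ch) - ord('a')]' raises IndexError exactly outside Pre_; inside Pre_ the
-- pyGetD default is never used; the loop's subscripts are always in range.
def getMinSum (security_values : List Int) (msg : String) : Int :=
  let n : Int := PySem.Str.len msg
  let msg_values := msg.toList.map (fun ch => PySem.List.pyGetD security_values ((ch.toNat : Int) - 97) 0)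
  let s := PySem.List.sorted msg_values (fun x => x) false
  pvAWhile s n.toNat 0 (n - 1) 0

-- ===== PORT B =====
def getMinSum_alt (security_values : List Int) (msg : String) : Int :=
  let counts := msg.toList.foldl (fun d ch =>
      let v := PySem.List.pyGetD security_values ((ch.toNat : Int) - 97) 0
      d.insert v (d.getD v 0 + 1)) PySem.Dict.empty
  let n : Int := PySem.Str.len msg
  let half := PySem.Int.floordiv n 2
  let res := (PySem.List.sorted counts.keys (fun x => x) false).foldl
    (fun (st : Int × Int) v =>
      let c := counts.getD v 0     -- counts[v]: v is always a key here, so no KeyError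
      let low := max 0 (min c (half - st.1))
      let high := max 0 (min c (st.1 + c - (n - half)))
      (st.1 + c, st.2 + v * (high - low))) (0, 0)
  res.2

-- ===== PRECONDITION & SPEC =====
-- Pre_ excludes exactly the inputs where 'security_values[ord(ch) - ord('a')]' raises IndexError
-- (an index ≥ len or < -len); negative in-range indices wrap in Python, identically in A and B,
-- and stay inside Pre_.
def Pre_getMinSum (security_values : List Int) (msg : String) : Prop :=
  (msg.toList.all (fun ch =>
    decide (-(security_values.length : Int) ≤ (ch.toNat : Int) - 97)
      && decide ((ch.toNat : Int) - 97 < security_values.length))) = true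
instance (security_values : List Int) (msg : String) : Decidable (Pre_getMinSum security_values msg) := by
  unfold Pre_getMinSum; infer_instance

def pvWitness_getMinSum : List Int × String := ([5, -2, 7], "cabbc")

def Spec_getMinSum (security_values : List Int) (msg : String) (out : Int) : Prop := out = getMinSum_alt security_values msg
instance (security_values : List Int) (msg : String) (out : Int) : Decidable (Spec_getMinSum security_values msg out) := by unfold Spec_getMinSum; infer_instance

-- ===== CLAIM (what is proved, stated in full; the proofs are below) =====
def Claim_equal_getMinSum : Prop := ∀ (security_values : List Int) (msg : String), Dom_getMinSum security_values msg → Pre_getMinSum security_values msg → Spec_getMinSum security_values msg (getMinSum security_values msg)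

-- ===== LEMMAS AND PROOFS =====

-- the per-index weight of "sum of upper half minus sum of lower half"
def pvW (n half j : Nat) : Int :=
  (if n - half ≤ j then 1 else 0) - (if j < half then 1 else 0)

-- each distinct value repeated as often as it occurs
def pvExpand (cnt : Int → Nat) (ks : List Int) : List Int :=
  ks.flatMap (fun v => List.replicate (cnt v) v)

-- B's loop body, named so the induction can talk about it
def pvStep (vals : List Int) (st : Int × Int) (v : Int) : Int × Int :=
  let c := ((vals.count v : Nat) : Int)
  let low := max 0 (min c (((vals.length / 2 : Nat) : Int) - st.1))
  let high := max 0 (min c (st.1 + c - ((vals.length : Int) - ((vals.length / 2 : Nat) : Int))))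
  (st.1 + c, st.2 + v * (high - low))

def pvL (vals : List Int) (p c : Nat) : Int :=
  max 0 (min (c : Int) (((vals.length / 2 : Nat) : Int) - (p : Int)))

def pvH (vals : List Int) (p c : Nat) : Int :=
  max 0 (min (c : Int) ((p : Int) + (c : Int) - ((vals.length : Int) - ((vals.length / 2 : Nat) : Int))))

lemma pv_getD_replicate (c j : Nat) (v : Int) (h : j < c) : (List.replicate c v).getD j 0 = v := by
  induction c generalizing j with
  | zero => omega
  | succ c ih =>
    cases j with
    | zero => simp [List.replicate_succ]
    | succ j => simp only [List.replicate_succ, List.getD_cons_succ]; exact ih j (by omega)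

lemma pv_sum_range_ite (n h : Nat) (hle : h ≤ n) (f : Nat → Int) :
    (∑ j ∈ Finset.range n, if j < h then f j else 0) = ∑ j ∈ Finset.range h, f j := by
  rw [← Finset.sum_filter]
  apply Finset.sum_congr
  · ext j
    simp only [Finset.mem_filter, Finset.mem_range]
    omega
  · intro j _; rfl

lemma pv_awhile_eq (s : List Int) (fuel i : Nat) (acc : Int) (h : s.length / 2 ≤ i + fuel) :
    pvAWhile s fuel (i : Int) ((s.length : Int) - 1 - (i : Int)) acc
      = acc + ∑ j ∈ Finset.Ico i (s.length / 2), (s.getD (s.length - 1 - j) 0 - s.getD j 0) := by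
  induction fuel generalizing i acc with
  | zero =>
    have he : Finset.Ico i (s.length / 2) = ∅ := Finset.Ico_eq_empty (by omega)
    simp [pvAWhile, he]
  | succ fuel ih =>
    by_cases hc : (i : Int) < (s.length : Int) - 1 - (i : Int)
    · have hi : i < s.length / 2 := by omega
      have hi2 : i < s.length := by omega
      have hcast : (s.length : Int) - 1 - (i : Int) = ((s.length - 1 - i : Nat) : Int) := by omega
      have hcast2 : ((s.length - 1 - i : Nat) : Int) - 1 = (s.length : Int) - 1 - ((i + 1 : Nat) : Int) := by omega
      have hcast3 : (i : Int) + 1 = ((i + 1 : Nat) : Int) := by omega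
      simp only [pvAWhile, if_pos hc]
      rw [hcast]
      simp only [PySem.List.pyGetD_natCast]
      rw [hcast2, hcast3, ih (i + 1) _ (by omega), Finset.sum_eq_sum_Ico_succ_bot hi]
      ring
    · have he : Finset.Ico i (s.length / 2) = ∅ := Finset.Ico_eq_empty (by omega)
      simp [pvAWhile, if_neg hc, he]

lemma pv_reindex (t : List Int) :
    (∑ j ∈ Finset.range (t.length / 2), (t.getD (t.length - 1 - j) 0 - t.getD j 0))
      = ∑ j ∈ Finset.range t.length, pvW t.length (t.length / 2) j * t.getD j 0 := by
  have hW : (∑ j ∈ Finset.range t.length, pvW t.length (t.length / 2) j * t.getD j 0)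
      = ∑ j ∈ Finset.range t.length,
          ((if t.length - t.length / 2 ≤ j then t.getD j 0 else 0)
            - (if j < t.length / 2 then t.getD j 0 else 0)) := by
    apply Finset.sum_congr rfl
    intro j _
    unfold pvW
    split_ifs <;> ring
  rw [hW, Finset.sum_sub_distrib, Finset.sum_sub_distrib]
  congr 1
  · rw [← Finset.sum_range_reflect (fun j => if t.length - t.length / 2 ≤ j then t.getD j 0 else 0) t.length]
    have hc : ∀ j ∈ Finset.range t.length,
        (if t.length - t.length / 2 ≤ t.length - 1 - j then t.getD (t.length - 1 - j) 0 else 0)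
          = (if j < t.length / 2 then t.getD (t.length - 1 - j) 0 else 0) := by
      intro j hj
      rw [Finset.mem_range] at hj
      have hiff : (t.length - t.length / 2 ≤ t.length - 1 - j) ↔ (j < t.length / 2) := by omega
      simp only [hiff]
    rw [Finset.sum_congr rfl hc, pv_sum_range_ite _ _ (Nat.div_le_self _ _)]
  · rw [pv_sum_range_ite _ _ (Nat.div_le_self _ _)]

lemma pv_sum_ind_high (c p A : Nat) :
    (∑ j ∈ Finset.range c, if A ≤ p + j then (1 : Int) else 0)
      = max 0 (min (c : Int) ((p : Int) + (c : Int) - (A : Int))) := by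
  induction c with
  | zero => simp only [Finset.range_zero, Finset.sum_empty, Nat.cast_zero]; omega
  | succ c ih =>
    rw [Finset.sum_range_succ, ih]
    split_ifs with h
    · push_cast; omega
    · push_cast; omega

lemma pv_sum_ind_low (c p H : Nat) :
    (∑ j ∈ Finset.range c, if p + j < H then (1 : Int) else 0)
      = max 0 (min (c : Int) ((H : Int) - (p : Int))) := by
  induction c with
  | zero => simp only [Finset.range_zero, Finset.sum_empty, Nat.cast_zero]; omega
  | succ c ih =>
    rw [Finset.sum_range_succ, ih]
    split_ifs with h
    · push_cast; omega
    · push_cast; omega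

lemma pv_sum_w_block (vals : List Int) (p c : Nat) :
    (∑ j ∈ Finset.range c, pvW vals.length (vals.length / 2) (p + j))
      = pvH vals p c - pvL vals p c := by
  have h1 : ((vals.length - vals.length / 2 : Nat) : Int)
      = (vals.length : Int) - ((vals.length / 2 : Nat) : Int) := by omega
  unfold pvW
  rw [Finset.sum_sub_distrib, pv_sum_ind_high c p (vals.length - vals.length / 2),
    pv_sum_ind_low c p (vals.length / 2), h1]
  simp only [pvH, pvL]

lemma pv_count_expand (cnt : Int → Nat) (ks : List Int) (hnd : ks.Nodup) (x : Int) :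
    (pvExpand cnt ks).count x = if x ∈ ks then cnt x else 0 := by
  induction ks with
  | nil => simp [pvExpand]
  | cons v ks ih =>
    rcases List.nodup_cons.mp hnd with ⟨hv, hnd'⟩
    have hsplit : pvExpand cnt (v :: ks) = List.replicate (cnt v) v ++ pvExpand cnt ks := by
      simp [pvExpand]
    rw [hsplit, List.count_append, ih hnd']
    by_cases hxv : x = v
    · subst hxv
      simp [hv]
    · have hvx : ¬ v = x := fun h => hxv h.symm
      simp [List.count_replicate, hxv, hvx, List.mem_cons]

lemma pv_mem_expand (cnt : Int → Nat) (ks : List Int) (b : Int) (hb : b ∈ pvExpand cnt ks) :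
    b ∈ ks := by
  simp only [pvExpand] at hb
  rcases List.mem_flatMap.mp hb with ⟨v, hv, hrep⟩
  rw [List.eq_of_mem_replicate hrep]
  exact hv

lemma pv_pairwise_expand (cnt : Int → Nat) (ks : List Int) (h : ks.Pairwise (· < ·)) :
    (pvExpand cnt ks).Pairwise (· ≤ ·) := by
  induction ks with
  | nil => simp [pvExpand]
  | cons v ks ih =>
    rw [List.pairwise_cons] at h
    have hsplit : pvExpand cnt (v :: ks) = List.replicate (cnt v) v ++ pvExpand cnt ks := by
      simp [pvExpand]
    rw [hsplit, List.pairwise_append]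
    refine ⟨List.pairwise_replicate.mpr (Or.inr le_rfl), ih h.2, ?_⟩
    intro a ha b hb
    rw [List.eq_of_mem_replicate ha]
    exact le_of_lt (h.1 b (pv_mem_expand cnt ks b hb))

lemma pv_bloop (vals : List Int) (ks : List Int) (p : Nat) (tot : Int) :
    (ks.foldl (pvStep vals) (((p : Nat) : Int), tot)).2
      = tot + ∑ j ∈ Finset.range (pvExpand (fun v => vals.count v) ks).length,
          pvW vals.length (vals.length / 2) (p + j)
            * (pvExpand (fun v => vals.count v) ks).getD j 0 := by
  induction ks generalizing p tot with
  | nil => simp [pvExpand]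
  | cons v ks ih =>
    have hstep : pvStep vals (((p : Nat) : Int), tot) v
        = ((((p + vals.count v : Nat)) : Int),
            tot + v * (pvH vals p (vals.count v) - pvL vals p (vals.count v))) := by
      simp only [pvStep, pvH, pvL, Prod.mk.injEq]
      constructor <;> · push_cast; try ring
    have hexp : pvExpand (fun v => vals.count v) (v :: ks)
        = List.replicate (vals.count v) v ++ pvExpand (fun v => vals.count v) ks := by
      simp [pvExpand]
    have hchunk1 : (∑ j ∈ Finset.range (vals.count v),
        pvW vals.length (vals.length / 2) (p + j)
          * (List.replicate (vals.count v) v ++ pvExpand (fun v => vals.count v) ks).getD j 0)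
        = v * (pvH vals p (vals.count v) - pvL vals p (vals.count v)) := by
      have hg : ∀ j ∈ Finset.range (vals.count v),
          pvW vals.length (vals.length / 2) (p + j)
            * (List.replicate (vals.count v) v ++ pvExpand (fun v => vals.count v) ks).getD j 0
          = pvW vals.length (vals.length / 2) (p + j) * v := by
        intro j hj
        rw [Finset.mem_range] at hj
        rw [List.getD_append _ _ _ _ (by rw [List.length_replicate]; omega),
          pv_getD_replicate _ _ _ hj]
      rw [Finset.sum_congr rfl hg, ← Finset.sum_mul, pv_sum_w_block vals p (vals.count v)]
      ring
    have hchunk2 : (∑ j ∈ Finset.range (pvExpand (fun v => vals.count v) ks).length,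
        pvW vals.length (vals.length / 2) (p + (vals.count v + j))
          * (List.replicate (vals.count v) v
              ++ pvExpand (fun v => vals.count v) ks).getD (vals.count v + j) 0)
        = ∑ j ∈ Finset.range (pvExpand (fun v => vals.count v) ks).length,
            pvW vals.length (vals.length / 2) (p + vals.count v + j)
              * (pvExpand (fun v => vals.count v) ks).getD j 0 := by
      apply Finset.sum_congr rfl
      intro j _
      rw [List.getD_append_right _ _ _ _ (by rw [List.length_replicate]; omega)]
      rw [List.length_replicate]
      have h1 : vals.count v + j - vals.count v = j := by omega
      have h2 : p + (vals.count v + j) = p + vals.count v + j := by omega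
      rw [h1, h2]
    rw [List.foldl_cons, hstep, ih (p + vals.count v), hexp, List.length_append,
      List.length_replicate, Finset.sum_range_add, hchunk1, hchunk2]
    ring

-- ===== VERDICT (by name: the statement is the Claim_ definition above) =====
theorem getMinSum_spec : Claim_equal_getMinSum := by
  intro sv msg _hdom _hpre
  unfold Spec_getMinSum
  set vals : List Int := msg.toList.map (fun ch => PySem.List.pyGetD sv ((ch.toNat : Int) - 97) 0) with hvals
  set s : List Int := PySem.List.sorted vals (fun x => x) false with hs
  set ks : List Int := PySem.List.sorted (PySem.Set.ofList vals) (fun x => x) false with hks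
  set T : List Int := pvExpand (fun v => vals.count v) ks with hT
  have hslen : s.length = vals.length := (PySem.List.sorted_perm vals (fun x => x) false).length_eq
  have hlen : PySem.Str.len msg = (vals.length : Int) := by
    rw [PySem.Str.len_eq, hvals, List.length_map]
  have hcounter : (msg.toList.foldl (fun d ch =>
      let v := PySem.List.pyGetD sv ((ch.toNat : Int) - 97) 0
      d.insert v (d.getD v 0 + 1)) PySem.Dict.empty)
      = PySem.Dict.counter vals := by
    rw [hvals, ← PySem.Dict.foldl_insert_getD_add_one_eq_counter]
    simp [List.foldl_map]
  have hhalf : PySem.Int.floordiv ((vals.length : Nat) : Int) 2 = ((vals.length / 2 : Nat) : Int) := by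
    exact_mod_cast PySem.Int.floordiv_natCast vals.length 2
  -- A's side: the two-pointer loop sums the weighted entries of the fully sorted list
  have hA' : getMinSum sv msg
      = ∑ j ∈ Finset.range vals.length, pvW vals.length (vals.length / 2) j * s.getD j 0 := by
    have hloop := pv_awhile_eq s vals.length 0 0 (by omega)
    simp only [Nat.cast_zero, sub_zero, zero_add] at hloop
    rw [← Finset.range_eq_Ico] at hloop
    have hre := pv_reindex s
    rw [hslen] at hloop hre
    show pvAWhile s (PySem.Str.len msg).toNat 0 (PySem.Str.len msg - 1) 0 = _
    have htn : ((vals.length : Int)).toNat = vals.length := by omega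
    rw [hlen, htn, hloop, hre]
  -- B's side equals the named fold over the sorted distinct values
  have hB' : getMinSum_alt sv msg = (ks.foldl (pvStep vals) ((0 : Int), (0 : Int))).2 := by
    unfold getMinSum_alt
    rw [hcounter, hlen]
    simp only [PySem.Dict.keys_counter, PySem.Dict.getD_counter, hhalf, ← hks]
    rfl
  have hB2 := pv_bloop vals ks 0 0
  rw [← hT] at hB2
  simp only [Nat.cast_zero, zero_add] at hB2
  -- T is sorted and a permutation of vals, hence T = s
  have hnodup : ks.Nodup :=
    ((PySem.List.sorted_perm (PySem.Set.ofList vals) (fun x => x) false).nodup_iff).mpr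
      (PySem.Set.nodup_ofList vals)
  have hmemks : ∀ x : Int, x ∈ ks ↔ x ∈ vals := by
    intro x
    rw [hks, PySem.List.mem_sorted, PySem.Set.mem_ofList]
  have hperm : T.Perm vals := by
    rw [List.perm_iff_count]
    intro x
    rw [hT, pv_count_expand _ _ hnodup]
    by_cases hx : x ∈ ks
    · rw [if_pos hx]
    · rw [if_neg hx]
      exact (List.count_eq_zero_of_not_mem (fun hmem => hx ((hmemks x).mpr hmem))).symm
  have hpair : T.Pairwise (· ≤ ·) := by
    apply pv_pairwise_expand
    rw [hks]
    exact PySem.List.sorted_ofList_pairwise_lt vals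
  have hTs : s = T := PySem.List.sorted_id_eq_of_perm_of_pairwise vals T hperm hpair
  have hTlen : T.length = vals.length := hperm.length_eq
  calc getMinSum sv msg
      = ∑ j ∈ Finset.range vals.length, pvW vals.length (vals.length / 2) j * s.getD j 0 := hA'
    _ = ∑ j ∈ Finset.range T.length, pvW vals.length (vals.length / 2) j * T.getD j 0 := by
        rw [hTs, hTlen]
    _ = getMinSum_alt sv msg := by
        rw [hB', hB2]
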